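/- GENERATED by mk_final_copies.py from the proof of the farm's unit `vorbis_decode_packet_rest.10` (farm:vorbis_decode_packet_rest.10.1: Proof.lean) as the
   re-elaboration sweep compiled it — do not edit. -/
import Asan.CheckWalk
import Vorbis.Spec.Units.vorbis_decode_packet_rest_10
import Vorbis.Spec.Worked.vorbis_decode_packet_rest_10_Lemmas

/-!
  UNIT vorbis_decode_packet_rest.10: segment 10 of `vorbis_decode_packet_rest` (0x1116af … 0x11181a, C lines 3357–3374: the
  inverse coupling, two nested loops) takes its entry assertion `At10` to its exit assertion `At11`.

  The work is in Lemmas.lean (namespace `Vorbis.Spec.vorbis_decode_packet_rest_10`): the frame lemma `stable_stores` (STABLE over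
  the segment's stores), the loop invariants `Outer` / `Inner`, the three walks `entry_to_outer`, `outer_body`, `inner_body`, and
  their composition by `ReachVia.loop` (`inner_loop`, `outer_loop`, `seg10`).
-/

namespace Vorbis.Spec.vorbis_decode_packet_rest_10
end Vorbis.Spec.vorbis_decode_packet_rest_10

/-- Segment 10 of `vorbis_decode_packet_rest` satisfies its statement: `Seg10`, given the contracts of the five check routines. -/
theorem Vorbis.Spec.Worked.vorbis_decode_packet_rest_10_ok : Vorbis.Spec.vorbis_decode_packet_rest_10.Statement := by
  unfold Vorbis.Spec.vorbis_decode_packet_rest_10.Statement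
  intro Lay hLay μ hμ u₀ hcode hld2 hst4 hld4 hld8 hld1
  -- `Seg10`: for all ghosts, the entry state `e`, the return address and the present state `v` with `At10`
  intro others frames len Ar stored room mode ysz e ret v hat
  exact Vorbis.Spec.vorbis_decode_packet_rest_10.seg10 hLay hμ hcode hld2 hst4 hld4 hld8 hld1 hat
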